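-- pv_equiv track=rewrite | github.com/Alexey-Borisov/IDAO-2022 | solution/utils_preprocess.py | get_defect_counts
-- ===== SOURCE A (Python) =====
-- def get_defect_counts(defects):
--     mo, w, se, s = 0, 0, 0, 0
--     for record in defects:
--         if record[0] == 'Mo':
--             mo += 1
--         elif record[0] == 'W':
--             w += 1
--         elif record[0] == 'S':
--             s += 1
--         elif record[0] == 'Se':
--             se += 1
--
--     #return { 'Mo': mo, 'W': w, 'S': s, 'Se': se, 'All': mo+w+s+se }
--     return (mo, w, s, se, mo+w+se+s)
-- ===== SOURCE B (Python) =====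
-- def get_defect_counts(defects):
--     # staged passes: project the codes once, then count each key of interest
--     heads = [record[0] for record in defects]
--     mo = heads.count('Mo')
--     w = heads.count('W')
--     s = heads.count('S')
--     se = heads.count('Se')
--     return (mo, w, s, se, mo + w + s + se)
-- ===== Notes on version B (the rewrite author's own statement) =====
-- stated objective: idiomatic
-- what changed: Replaces A's single branched accumulator loop with staged passes: project the first column once, then count each of the four codes with list.count and sum the four counts.
import Mathlib
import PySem

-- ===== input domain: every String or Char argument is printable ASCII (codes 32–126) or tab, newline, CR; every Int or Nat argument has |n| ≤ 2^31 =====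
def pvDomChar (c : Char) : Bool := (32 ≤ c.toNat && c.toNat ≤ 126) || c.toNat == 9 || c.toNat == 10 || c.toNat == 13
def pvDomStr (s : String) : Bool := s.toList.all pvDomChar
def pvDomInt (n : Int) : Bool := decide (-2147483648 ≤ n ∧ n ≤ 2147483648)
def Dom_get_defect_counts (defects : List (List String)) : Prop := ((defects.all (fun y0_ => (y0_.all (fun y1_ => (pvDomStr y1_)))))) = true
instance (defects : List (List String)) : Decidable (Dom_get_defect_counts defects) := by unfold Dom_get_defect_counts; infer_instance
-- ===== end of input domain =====

-- B replaces A's single branched-accumulator loop with staged passes: project the first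
-- column once, then count each of the four codes separately (idiomatic).

-- ===== PORT A =====
-- record[0] is ported as PySem.List.pyGetD record 0 "" — exact on nonempty records;
-- Python raises IndexError on an empty record, excluded by Pre_ below.
def getDefectCountsLoopA : List (List String) → Int → Int → Int → Int → Int × Int × Int × Int × Int
  | [], mo, w, se, s => (mo, w, s, se, mo + w + se + s)
  | r :: rest, mo, w, se, s =>
    let h := PySem.List.pyGetD r 0 ""
    if h = "Mo" then getDefectCountsLoopA rest (mo + 1) w se s
    else if h = "W" then getDefectCountsLoopA rest mo (w + 1) se s
    else if h = "S" then getDefectCountsLoopA rest mo w se (s + 1)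
    else if h = "Se" then getDefectCountsLoopA rest mo w (se + 1) s
    else getDefectCountsLoopA rest mo w se s

def get_defect_counts (defects : List (List String)) : Int × Int × Int × Int × Int :=
  getDefectCountsLoopA defects 0 0 0 0

-- ===== PORT B =====
def get_defect_counts_alt (defects : List (List String)) : Int × Int × Int × Int × Int :=
  let heads := defects.map (fun r => PySem.List.pyGetD r 0 "")
  let mo := PySem.List.count heads "Mo"
  let w := PySem.List.count heads "W"
  let s := PySem.List.count heads "S"
  let se := PySem.List.count heads "Se"
  (mo, w, s, se, mo + w + s + se)

-- ===== PRECONDITION & SPEC =====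
-- Pre_ excludes inputs containing an empty record, on which both Pythons raise IndexError at record[0].
def Pre_get_defect_counts (defects : List (List String)) : Prop :=
  ∀ r ∈ defects, r ≠ []
instance (defects : List (List String)) : Decidable (Pre_get_defect_counts defects) := by unfold Pre_get_defect_counts; infer_instance

def pvWitness_get_defect_counts : List (List String) := [["Mo", "1"], ["S"], ["W"], ["Se"], ["Xx"]]

def Spec_get_defect_counts (defects : List (List String)) (out : Int × Int × Int × Int × Int) : Prop := out = get_defect_counts_alt defects
instance (defects : List (List String)) (out : Int × Int × Int × Int × Int) : Decidable (Spec_get_defect_counts defects out) := by unfold Spec_get_defect_counts; infer_instance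

-- ===== CLAIM (what is proved, stated in full; the proofs are below) =====
def Claim_equal_get_defect_counts : Prop := ∀ (defects : List (List String)), Dom_get_defect_counts defects → Pre_get_defect_counts defects → Spec_get_defect_counts defects (get_defect_counts defects)

-- ===== LEMMAS AND PROOFS =====

-- heads of the records, as both sides key on them
def pvHeads (defects : List (List String)) : List String :=
  defects.map (fun r => PySem.List.pyGetD r 0 "")

theorem loopA_eq_counts (l : List (List String)) : ∀ (mo w se s : Int),
    getDefectCountsLoopA l mo w se s =
      (mo + ((pvHeads l).count "Mo" : Int), w + ((pvHeads l).count "W" : Int),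
       s + ((pvHeads l).count "S" : Int), se + ((pvHeads l).count "Se" : Int),
       mo + w + se + s + ((pvHeads l).count "Mo" : Int) + ((pvHeads l).count "W" : Int)
         + ((pvHeads l).count "Se" : Int) + ((pvHeads l).count "S" : Int)) := by
  induction l with
  | nil => intro mo w se s; simp [getDefectCountsLoopA, pvHeads]
  | cons r rest ih =>
    intro mo w se s
    simp only [getDefectCountsLoopA, pvHeads, List.map_cons, List.count_cons]
    by_cases h1 : PySem.List.pyGetD r 0 "" = "Mo"
    · simp [h1, ih, pvHeads]; omega
    · by_cases h2 : PySem.List.pyGetD r 0 "" = "W"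
      · simp [h1, h2, ih, pvHeads]; omega
      · by_cases h3 : PySem.List.pyGetD r 0 "" = "S"
        · simp [h1, h2, h3, ih, pvHeads]; omega
        · by_cases h4 : PySem.List.pyGetD r 0 "" = "Se"
          · simp [h1, h2, h3, h4, ih, pvHeads]; omega
          · simp [h1, h2, h3, h4, ih, pvHeads]

-- ===== VERDICT (by name: the statement is the Claim_ definition above) =====
theorem get_defect_counts_spec : Claim_equal_get_defect_counts := by
  intro defects _ _
  unfold Spec_get_defect_counts get_defect_counts get_defect_counts_alt
  simp only [loopA_eq_counts, PySem.List.count_eq, pvHeads]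
  simp
  omega
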